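-- pv_equiv track=rewrite | github.com/v1neethnc/advent-of-code-solutions | 2015/2015_25.py | paper_filler
-- ===== SOURCE A (Python) =====
-- def code_gen(current):
-- 	return (current * 252533) % 33554393
--
-- def paper_filler(val, row, col):
-- 	r, c, ind = 1, 1, 1
-- 	while True:
-- 		if r == 1:
-- 			r = c + 1
-- 			c = 1
-- 		else:
-- 			r -= 1
-- 			c += 1
-- 		val = code_gen(val)
-- 		if [r, c] == [row, col]:
-- 			return val
-- ===== SOURCE B (Python) =====
-- def paper_filler(val, row, col):
--     steps = (row + col - 2) * (row + col - 1) // 2 + col - 1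
--     return (val * pow(252533, steps, 33554393)) % 33554393
-- ===== Notes on version B (the rewrite author's own statement) =====
-- stated objective: faster
-- what changed: Replaces the step-by-step diagonal walk (one modular multiply per cell) by the closed-form cell index (row+col-2)(row+col-1)/2 + col - 1 and one modular exponentiation pow(252533, steps, 33554393).
-- outside the precondition, e.g. on paper_filler(20151125, 1, 1): A does not finish within the time limit, B returns 20151125; on paper_filler(20151125, 0, 3): A does not finish within the time limit, B returns 16080970
import Mathlib
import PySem

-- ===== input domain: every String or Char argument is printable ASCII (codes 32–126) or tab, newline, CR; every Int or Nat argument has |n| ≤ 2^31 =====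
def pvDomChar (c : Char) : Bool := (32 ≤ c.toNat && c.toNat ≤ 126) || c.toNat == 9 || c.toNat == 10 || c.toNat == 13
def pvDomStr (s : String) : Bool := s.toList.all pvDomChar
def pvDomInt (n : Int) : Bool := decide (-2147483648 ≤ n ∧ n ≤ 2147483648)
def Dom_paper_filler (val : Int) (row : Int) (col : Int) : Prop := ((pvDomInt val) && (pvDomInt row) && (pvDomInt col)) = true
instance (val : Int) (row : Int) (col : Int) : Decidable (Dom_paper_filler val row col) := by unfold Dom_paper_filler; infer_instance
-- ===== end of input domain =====

-- B replaces A's cell-by-cell diagonal walk by the closed-form cell index plus one modular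
-- exponentiation (objective: faster, asymptotic). Pre_ excludes inputs (row < 1, col < 1, or
-- (row,col) = (1,1)) on which A's while-loop never reaches its target and so never returns.


-- ===== PORT A =====
def code_gen (current : Int) : Int := PySem.Int.mod (current * 252533) 33554393

-- A's 'while True' loop; fuel only makes the recursion total (it cannot run out on Pre_ inputs,
-- see fuel_suffices below used in the proof).
def paper_fill_loop : Nat → Int → Int → Int → Int → Int → Int
  | 0, val, _, _, _, _ => val
  | fuel+1, val, r, c, row, col =>
    let r' := if r = 1 then c + 1 else r - 1
    let c' := if r = 1 then 1 else c + 1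
    let val' := code_gen val
    if r' = row ∧ c' = col then val' else paper_fill_loop fuel val' r' c' row col

def paper_filler (val : Int) (row : Int) (col : Int) : Int :=
  paper_fill_loop (((row + col - 2) * (row + col - 1) + 2 * col).toNat) val 1 1 row col

-- ===== PORT B =====
def paper_filler_alt (val : Int) (row : Int) (col : Int) : Int :=
  let steps : Int := PySem.Int.floordiv ((row + col - 2) * (row + col - 1)) 2 + col - 1
  PySem.Int.mod (val * PySem.Int.powMod 252533 steps.toNat 33554393) 33554393

-- ===== PRECONDITION & SPEC =====
-- Pre_ excludes exactly the inputs on which A's loop never returns (it diverges): row < 1,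
-- col < 1, or (row, col) = (1, 1) (the walk leaves (1,1) before the first check and never returns).
def Pre_paper_filler (val : Int) (row : Int) (col : Int) : Prop :=
  1 ≤ row ∧ 1 ≤ col ∧ ¬(row = 1 ∧ col = 1)
instance (val : Int) (row : Int) (col : Int) : Decidable (Pre_paper_filler val row col) := by
  unfold Pre_paper_filler; infer_instance

def pvWitness_paper_filler : Int × Int × Int := (20151125, 3, 4)

def Spec_paper_filler (val : Int) (row : Int) (col : Int) (out : Int) : Prop := out = paper_filler_alt val row col
instance (val : Int) (row : Int) (col : Int) (out : Int) : Decidable (Spec_paper_filler val row col out) := by unfold Spec_paper_filler; infer_instance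

-- ===== CLAIM (what is proved, stated in full; the proofs are below) =====
def Claim_equal_paper_filler : Prop := ∀ (val : Int) (row : Int) (col : Int), Dom_paper_filler val row col → Pre_paper_filler val row col → Spec_paper_filler val row col (paper_filler val row col)

-- ===== LEMMAS AND PROOFS =====

-- linear index (doubled, offset) of cell (r, c) in A's diagonal order
def Jidx (r c : Int) : Int := (r + c - 2) * (r + c - 1) + 2 * c

theorem mod_m (x : Int) : PySem.Int.mod x 33554393 = x % 33554393 :=
  PySem.Int.mod_eq_emod_of_pos (by norm_num)

theorem Jidx_step (r c : Int) :
    Jidx (if r = 1 then c + 1 else r - 1) (if r = 1 then 1 else c + 1) = Jidx r c + 2 := by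
  by_cases h : r = 1 <;> simp [h, Jidx] <;> ring

theorem Jidx_inj {r c row col : Int} (hr : 1 ≤ r) (hc : 1 ≤ c) (hrow : 1 ≤ row)
    (hcol : 1 ≤ col) (h : Jidx r c = Jidx row col) : r = row ∧ c = col := by
  unfold Jidx at h
  have hs : r + c = row + col := by
    by_contra hne
    rcases lt_or_gt_of_ne hne with hlt | hgt
    · nlinarith
    · nlinarith
  constructor <;> nlinarith

theorem loop_eq (d : Nat) : ∀ (fuel : Nat) (val r c row col : Int),
    1 ≤ r → 1 ≤ c → 1 ≤ row → 1 ≤ col →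
    Jidx r c + 2 * ((d : Int) + 1) = Jidx row col →
    d + 1 ≤ fuel →
    paper_fill_loop fuel val r c row col = (val * 252533 ^ (d + 1)) % 33554393 := by
  induction d with
  | zero =>
    intro fuel val r c row col hr hc hrow hcol hJ hfuel
    obtain ⟨f, rfl⟩ : ∃ f, fuel = f + 1 := ⟨fuel - 1, by omega⟩
    have hstep := Jidx_step r c
    have heq : (if r = 1 then c + 1 else r - 1) = row ∧ (if r = 1 then 1 else c + 1) = col := by
      apply Jidx_inj _ _ hrow hcol
      · omega
      · by_cases h : r = 1 <;> simp [h] <;> omega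
      · by_cases h : r = 1 <;> simp [h] <;> omega
    simp only [paper_fill_loop, heq, and_self, if_true, code_gen, mod_m]
    ring_nf
  | succ d ih =>
    intro fuel val r c row col hr hc hrow hcol hJ hfuel
    obtain ⟨f, rfl⟩ : ∃ f, fuel = f + 1 := ⟨fuel - 1, by omega⟩
    have hstep := Jidx_step r c
    have hne : ¬((if r = 1 then c + 1 else r - 1) = row ∧ (if r = 1 then 1 else c + 1) = col) := by
      rintro ⟨h1, h2⟩
      rw [← h1, ← h2] at hJ
      push_cast at hJ
      omega
    have hr' : 1 ≤ (if r = 1 then c + 1 else r - 1) := by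
      by_cases h : r = 1 <;> simp [h] <;> omega
    have hc' : 1 ≤ (if r = 1 then 1 else c + 1) := by
      by_cases h : r = 1 <;> simp [h] <;> omega
    simp only [paper_fill_loop, hne, if_false]
    rw [ih f (code_gen val) _ _ row col hr' hc' hrow hcol (by push_cast at hJ ⊢; omega) (by omega)]
    rw [code_gen, mod_m, Int.mul_emod, Int.emod_emod_of_dvd _ (dvd_refl _), ← Int.mul_emod]
    ring_nf

theorem even_helper (s : Int) : Even ((s - 2) * (s - 1)) := by
  have := Int.even_mul_succ_self (s - 2)
  simpa using (by ring_nf at this ⊢; exact this : Even ((s - 2) * (s - 1)))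

-- ===== VERDICT (by name: the statement is the Claim_ definition above) =====
theorem paper_filler_spec : Claim_equal_paper_filler := by
  intro val row col _ ⟨hrow, hcol, hne⟩
  unfold Spec_paper_filler paper_filler paper_filler_alt
  -- the target's (doubled) index is 2k + 2 with k ≥ 1
  obtain ⟨k, hk⟩ : ∃ k : Int, (row + col - 2) * (row + col - 1) = 2 * k := by
    obtain ⟨t, ht⟩ := even_helper (row + col)
    exact ⟨t, by omega⟩
  have hs3 : 3 ≤ row + col := by omega
  have hk1 : 1 ≤ k := by nlinarith
  have hkc : 1 ≤ k + col := by omega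
  -- B's step count is exactly k + col - 1... compute it
  have hfd : PySem.Int.floordiv ((row + col - 2) * (row + col - 1)) 2 = k := by
    rw [PySem.Int.floordiv_eq_ediv_of_pos (by norm_num), hk]
    exact Int.mul_ediv_cancel_left k (by norm_num)
  have hsteps : PySem.Int.floordiv ((row + col - 2) * (row + col - 1)) 2 + col - 1
      = (k + col - 1) := by rw [hfd]
  set d : Nat := (k + col - 1).toNat with hd
  have hd1 : (d : Int) + 1 = k + col := by simp [hd]; omega
  have hJ : Jidx 1 1 + 2 * ((d - 1 : Nat) + 1 : Int) = Jidx row col := by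
    have : ((d - 1 : Nat) : Int) = (d : Int) - 1 := by omega
    rw [this]
    unfold Jidx
    push_cast
    omega
  have hfuel : (d - 1) + 1 ≤ ((row + col - 2) * (row + col - 1) + 2 * col).toNat := by
    omega
  rw [loop_eq (d - 1) _ val 1 1 row col (by norm_num) (by norm_num) hrow hcol hJ hfuel]
  rw [hsteps]
  simp only [PySem.Int.powMod, mod_m]
  have hdn : (d - 1) + 1 = (k + col - 1).toNat := by omega
  rw [hdn]
  conv_lhs => rw [Int.mul_emod]
  conv_rhs => rw [Int.mul_emod]
  rw [Int.emod_emod_of_dvd _ (dvd_refl _)]
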